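-- pv_equiv track=rewrite | github.com/instafiore/AMOSUM | test_dp.py | get_all_lit_below_you
-- ===== SOURCE A (Python) =====
-- def get_all_lit_below_you(lits, l):
--
--     res = []
--     found = False
--     for i in range(len(lits) - 1, -1, -1):
--         lit = lits[i]
--         if lit == l:
--             found = True
--         if found:
--             res.append(lit)
--
--     return frozenset(res)
-- ===== SOURCE B (Python) =====
-- def get_all_lit_below_you(lits, l):
--     last = -1
--     for i, lit in enumerate(lits):
--         if lit == l:
--             last = i
--     if last == -1:
--         return frozenset()
--     return frozenset(reversed(lits[:last + 1]))
-- ===== Notes on version B (the rewrite author's own statement) =====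
-- stated objective: simpler
-- what changed: Replaces the reverse index scan with a found flag by a forward enumerate pass locating the last occurrence of l, then a single slice materialising the result set.
import Mathlib
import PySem

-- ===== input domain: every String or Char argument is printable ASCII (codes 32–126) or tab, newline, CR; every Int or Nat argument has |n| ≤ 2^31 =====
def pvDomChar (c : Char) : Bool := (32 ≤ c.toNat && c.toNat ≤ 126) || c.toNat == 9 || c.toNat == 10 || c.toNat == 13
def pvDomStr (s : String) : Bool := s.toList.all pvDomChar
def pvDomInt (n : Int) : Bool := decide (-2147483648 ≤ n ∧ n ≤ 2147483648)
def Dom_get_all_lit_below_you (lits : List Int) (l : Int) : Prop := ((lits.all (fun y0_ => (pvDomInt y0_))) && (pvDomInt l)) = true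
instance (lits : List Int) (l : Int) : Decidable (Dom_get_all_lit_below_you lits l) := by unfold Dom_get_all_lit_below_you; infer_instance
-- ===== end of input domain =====

-- B replaces A's reverse scan with a `found` flag by a forward pass locating the
-- last occurrence of l followed by one slice (objective: simpler decomposition).

-- ===== PORT A =====
-- the body of A's for-loop over range(len(lits)-1, -1, -1), acting on the state (res, found)
def pvStepA (lits : List Int) (l : Int) (st : List Int × Bool) (i : Int) : List Int × Bool :=
  let lit := PySem.List.pyGetD lits i 0
  let found := st.2 || (lit == l)
  ((if found then st.1 ++ [lit] else st.1), found)

def get_all_lit_below_you (lits : List Int) (l : Int) : List Int :=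
  let st := (PySem.List.pyRange ((lits.length : Int) - 1) (-1) (-1)).foldl (pvStepA lits l) ([], false)
  PySem.Set.ofList st.1

-- ===== PORT B =====
def get_all_lit_below_you_alt (lits : List Int) (l : Int) : List Int :=
  let last : Int := (PySem.List.enumerate lits 0).foldl
    (fun acc p => if p.2 == l then p.1 else acc) (-1)
  if last == -1 then []
  else PySem.Set.ofList (PySem.List.slice lits none (some (last + 1))).reverse

-- ===== PRECONDITION & SPEC =====
def Spec_get_all_lit_below_you (lits : List Int) (l : Int) (out : List Int) : Prop := out = get_all_lit_below_you_alt lits l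
instance (lits : List Int) (l : Int) (out : List Int) : Decidable (Spec_get_all_lit_below_you lits l out) := by unfold Spec_get_all_lit_below_you; infer_instance

-- ===== CLAIM (what is proved, stated in full; the proofs are below) =====
def Claim_equal_get_all_lit_below_you : Prop := ∀ (lits : List Int) (l : Int), Dom_get_all_lit_below_you lits l → Spec_get_all_lit_below_you lits l (get_all_lit_below_you lits l)

-- ===== LEMMAS AND PROOFS =====

-- the loop body as a structural fold step over the element (index eliminated)
def pvStep (l : Int) (st : List Int × Bool) (lit : Int) : List Int × Bool :=
  let found := st.2 || (lit == l)
  ((if found then st.1 ++ [lit] else st.1), found)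

-- A's index loop over range(len-1, -1, -1) is a structural fold over lits.reverse
theorem pvLoopA_eq (lits : List Int) (l : Int) :
    (PySem.List.pyRange ((lits.length : Int) - 1) (-1) (-1)).foldl (pvStepA lits l) ([], false)
      = lits.reverse.foldl (pvStep l) ([], false) := by
  have h1 : PySem.List.pyRange ((lits.length : Int) - 1) (-1) (-1)
      = (PySem.List.pyRange 0 (lits.length : Int) 1).reverse := by
    have := PySem.List.pyRange_neg_one_eq_reverse ((lits.length : Int) - 1) (-1)
    simpa using this
  rw [h1]
  have h2 : (PySem.List.pyRange 0 (lits.length : Int) 1).map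
      (fun j => PySem.List.pyGetD lits j 0) = lits := by
    simpa using PySem.List.map_pyGetD_pyRange_zero lits (0 : Int)
  calc (PySem.List.pyRange 0 (lits.length : Int) 1).reverse.foldl (pvStepA lits l) ([], false)
      = ((PySem.List.pyRange 0 (lits.length : Int) 1).reverse.map
          (fun j => PySem.List.pyGetD lits j 0)).foldl (pvStep l) ([], false) := by
        rw [List.foldl_map]; rfl
    _ = lits.reverse.foldl (pvStep l) ([], false) := by rw [List.map_reverse, h2]

-- once found, the loop appends everything
theorem pvStep_found (l : Int) (ys res : List Int) :
    ys.foldl (pvStep l) (res, true) = (res ++ ys, true) := by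
  induction ys generalizing res with
  | nil => simp
  | cons y ys ih => simp [pvStep, ih]

theorem pvResA_snoc (l : Int) (xs : List Int) (x : Int) :
    (xs ++ [x]).reverse.foldl (pvStep l) ([], false)
      = if x = l then (x :: xs.reverse, true) else xs.reverse.foldl (pvStep l) ([], false) := by
  rw [List.reverse_append]
  simp only [List.reverse_cons, List.reverse_nil, List.nil_append, List.singleton_append,
    List.foldl_cons]
  by_cases h : x = l
  · have hs : pvStep l ([], false) x = ([x], true) := by simp [pvStep, h]
    rw [hs, pvStep_found, if_pos h]
    simp
  · have hs : pvStep l ([], false) x = ([], false) := by simp [pvStep, h]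
    rw [hs, if_neg h]

def pvLast (lits : List Int) (l : Int) : Int :=
  (PySem.List.enumerate lits 0).foldl (fun acc p => if p.2 == l then p.1 else acc) (-1)

theorem pvLast_snoc (l : Int) (xs : List Int) (x : Int) :
    pvLast (xs ++ [x]) l = if x = l then (xs.length : Int) else pvLast xs l := by
  unfold pvLast
  rw [PySem.List.enumerate_append, List.foldl_append]
  by_cases h : x = l <;> simp [h]

theorem pvLast_bounds (lits : List Int) (l : Int) :
    -1 ≤ pvLast lits l ∧ pvLast lits l < (lits.length : Int) := by
  induction lits using List.reverseRecOn with
  | nil => unfold pvLast; simp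
  | append_singleton xs x ih =>
    rw [pvLast_snoc]
    by_cases h : x = l
    · simp [h, List.length_append]
    · simp only [h, if_false]
      have hlen : (xs ++ [x]).length = xs.length + 1 := by simp
      rw [hlen]
      push_cast
      omega

theorem pvMain (lits : List Int) (l : Int) :
    get_all_lit_below_you lits l = get_all_lit_below_you_alt lits l := by
  induction lits using List.reverseRecOn with
  | nil =>
    unfold get_all_lit_below_you get_all_lit_below_you_alt
    simp [PySem.List.pyRange_neg_one_eq_nil]
  | append_singleton xs x ih =>
    unfold get_all_lit_below_you
    rw [pvLoopA_eq, pvResA_snoc]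
    show _ = get_all_lit_below_you_alt (xs ++ [x]) l
    unfold get_all_lit_below_you_alt
    rw [show ((PySem.List.enumerate (xs ++ [x]) 0).foldl
        (fun acc p => if p.2 == l then p.1 else acc) (-1)) = pvLast (xs ++ [x]) l from rfl,
      pvLast_snoc]
    by_cases h : x = l
    · -- last element hit: B takes the whole list
      have hlen : ((xs.length : Int) == -1) = false := by
        simp
      rw [if_pos h, if_pos h]
      simp only [hlen, Bool.false_eq_true, if_false]
      have hslice : PySem.List.slice (xs ++ [x]) none (some ((xs.length : Int) + 1))
          = xs ++ [x] := by
        have hc : ((xs.length : Int) + 1) = ((xs.length + 1 : Nat) : Int) := by push_cast; ring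
        rw [hc, PySem.List.slice_to_natCast]
        simp [List.take_of_length_le, List.length_append]
      rw [hslice]
      simp
    · -- last element not l: both sides reduce to the value on xs
      rw [if_neg h, if_neg h]
      have hb := pvLast_bounds xs l
      have ih' := ih
      unfold get_all_lit_below_you at ih'
      rw [pvLoopA_eq] at ih'
      rw [ih']
      unfold get_all_lit_below_you_alt
      rw [show ((PySem.List.enumerate xs 0).foldl
          (fun acc p => if p.2 == l then p.1 else acc) (-1)) = pvLast xs l from rfl]
      by_cases hl : pvLast xs l = -1
      · simp [hl]
      · have h0 : 0 ≤ pvLast xs l := by omega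
        have h1 : 0 ≤ pvLast xs l + 1 := by omega
        have heq : ((pvLast xs l == -1) : Bool) = false := by simp [hl]
        simp only [heq, Bool.false_eq_true, if_false]
        have hsl : PySem.List.slice (xs ++ [x]) none (some (pvLast xs l + 1))
            = PySem.List.slice xs none (some (pvLast xs l + 1)) := by
          rw [PySem.List.slice_to _ h1, PySem.List.slice_to _ h1]
          exact List.take_append_of_le_length (by
            have := hb.2
            omega)
        rw [hsl]

-- ===== VERDICT (by name: the statement is the Claim_ definition above) =====
theorem get_all_lit_below_you_spec : Claim_equal_get_all_lit_below_you := by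
  intro lits l _
  exact pvMain lits l
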